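-- pv_equiv track=rewrite | github.com/Fondamenti18/fondamenti-di-programmazione | students/1823149/homework02/program03.py | abbina
-- ===== SOURCE A (Python) =====
-- def abbina(cod, parola):
--     dizionario_abbinato=dict()
--     i=0
--     while i<len(parola):
--         if parola[i] not in dizionario_abbinato:
--             dizionario_abbinato[parola[i]]=cod[i]
--         i+=1
--     return dizionario_abbinato
-- ===== SOURCE B (Python) =====
-- def abbina(cod, parola):
--     # pass 1: walk the positions in reverse and overwrite unconditionally,
--     # so the smallest index for each character is written last (no membership test)
--     pos = {}
--     for i, c in reversed(list(enumerate(parola))):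
--         pos[c] = i
--     # pass 2: rebuild in first-occurrence order; duplicates re-assign the same entry in place
--     return {c: cod[pos[c]] for c in parola}
-- ===== Notes on version B (the rewrite author's own statement) =====
-- stated objective: alternative
-- what changed: A's single pass with a per-character membership test is replaced by two staged passes: a reverse sweep that unconditionally overwrites a char->index map (so the first occurrence wins without any membership check), then a comprehension that rebuilds the dict in first-occurrence order from cod at those indices.
import Mathlib
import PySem

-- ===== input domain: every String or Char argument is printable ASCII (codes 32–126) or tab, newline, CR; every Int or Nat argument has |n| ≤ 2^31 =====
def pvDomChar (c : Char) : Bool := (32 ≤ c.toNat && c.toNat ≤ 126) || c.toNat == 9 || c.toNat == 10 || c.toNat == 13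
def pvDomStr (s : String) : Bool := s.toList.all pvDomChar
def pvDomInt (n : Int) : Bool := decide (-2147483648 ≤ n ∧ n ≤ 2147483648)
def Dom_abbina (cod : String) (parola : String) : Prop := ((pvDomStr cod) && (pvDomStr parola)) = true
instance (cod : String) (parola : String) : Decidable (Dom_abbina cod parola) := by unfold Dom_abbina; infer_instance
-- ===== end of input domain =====

-- B replaces A's membership-tested single pass by two staged passes: a reverse overwrite
-- of a char->index map, then a rebuild in first-occurrence order (alternative; not faster).

-- ===== PORT A =====
-- while i < len(parola): if parola[i] not in d: d[parola[i]] = cod[i]; i += 1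
-- cod[i] may raise IndexError (pyGet? = none): the loop stops there; Pre_abbina excludes exactly those inputs.
def abbinaLoopA (cod : List Char) (parola : List Char) (i : Nat) (d : PySem.Dict String String) : PySem.Dict String String :=
  if h : i < parola.length then
    if d.contains (String.ofList [parola[i]]) then
      abbinaLoopA cod parola (i + 1) d
    else
      match PySem.List.pyGet? cod (i : Int) with
      | some ch => abbinaLoopA cod parola (i + 1) (d.insert (String.ofList [parola[i]]) (String.ofList [ch]))
      | none => d
  else d
termination_by parola.length - i

def abbina (cod : String) (parola : String) : List (String × String) :=
  (abbinaLoopA cod.toList parola.toList 0 PySem.Dict.empty).items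

-- ===== PORT B =====
-- pass 1: for i, c in reversed(list(enumerate(parola))): pos[c] = i
-- pass 2: {c: cod[pos[c]] for c in parola}; a raising cod[...] (pyGet? = none) or a missing
-- key (unreachable) skips — the raising case is excluded by Pre_abbina.
def abbina_alt (cod : String) (parola : String) : List (String × String) :=
  let pos := ((PySem.List.enumerate parola.toList 0).reverse).foldl
      (fun d ic => d.insert (String.ofList [ic.2]) ic.1) PySem.Dict.empty
  (parola.toList.foldl (fun d c =>
      match pos.get? (String.ofList [c]) with
      | some j =>
        match PySem.List.pyGet? cod.toList j with
        | some ch => d.insert (String.ofList [c]) (String.ofList [ch])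
        | none => d
      | none => d) PySem.Dict.empty).items

-- ===== PRECONDITION & SPEC =====
-- Pre_ excludes exactly the inputs on which A raises IndexError: a first occurrence in parola at an index ≥ len(cod).
def Pre_abbina (cod : String) (parola : String) : Prop :=
  ∀ i, (h : i < parola.toList.length) → parola.toList[i] ∉ parola.toList.take i → i < cod.toList.length
instance (cod : String) (parola : String) : Decidable (Pre_abbina cod parola) := by unfold Pre_abbina; infer_instance

def pvWitness_abbina : String × String := ("xy", "aa")

def Spec_abbina (cod : String) (parola : String) (out : List (String × String)) : Prop := out = abbina_alt cod parola
instance (cod : String) (parola : String) (out : List (String × String)) : Decidable (Spec_abbina cod parola out) := by unfold Spec_abbina; infer_instance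

-- ===== CLAIM (what is proved, stated in full; the proofs are below) =====
def Claim_equal_abbina : Prop := ∀ (cod : String) (parola : String), Dom_abbina cod parola → Pre_abbina cod parola → Spec_abbina cod parola (abbina cod parola)

-- ===== LEMMAS AND PROOFS =====

-- Singleton-string keys are injective in the underlying characters.
lemma ofList_singleton_inj (a b : Char) : (String.ofList [a] = String.ofList [b]) ↔ a = b := by
  constructor
  · intro he
    have := congrArg String.toList he
    simpa using this
  · intro he; rw [he]

-- get? after folding inserts over a REVERSED list: the FIRST match in the original list wins.
lemma get?_revfold (l : List (Int × Char)) (d0 : PySem.Dict String Int) (k : String) :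
    ((l.reverse).foldl (fun d ic => d.insert (String.ofList [ic.2]) ic.1) d0).get? k
      = match l.find? (fun ic => String.ofList [ic.2] == k) with
        | some ic => some ic.1
        | none => d0.get? k := by
  induction l generalizing d0 with
  | nil => simp
  | cons ic t ih =>
    rw [List.reverse_cons, List.foldl_append]
    by_cases h : String.ofList [ic.2] = k
    · have hp : (fun ic : Int × Char => String.ofList [ic.2] == k) ic = true := by
        simp [h]
      rw [List.find?_cons, show (String.ofList [ic.2] == k) = true from hp]
      simp only [List.foldl_cons, List.foldl_nil]
      rw [h, PySem.Dict.get?_insert_self]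
    · have hp : (fun ic : Int × Char => String.ofList [ic.2] == k) ic = false := by
        simp [h]
      rw [List.find?_cons, show (String.ofList [ic.2] == k) = false from hp]
      simp only [List.foldl_cons, List.foldl_nil]
      rw [PySem.Dict.get?_insert_of_ne _ _ (Ne.symm h), ih]

-- find? over an enumeration, keyed on the character, is index? shifted by the start.
lemma find?_enumerate_eq_index? (p : List Char) (c : Char) : ∀ s : Int,
    (PySem.List.enumerate p s).find? (fun ic => String.ofList [ic.2] == String.ofList [c])
      = (PySem.List.index? p c).map (fun j => ((s + (j : Int), c) : Int × Char)) := by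
  induction p with
  | nil => intro s; simp
  | cons a t ih =>
    intro s
    rw [PySem.List.enumerate_cons]
    by_cases h : a = c
    · subst h
      rw [List.find?_cons, show (String.ofList [a] == String.ofList [a]) = true by simp]
      rw [PySem.List.index?_cons_self]
      simp
    · rw [List.find?_cons, show (String.ofList [a] == String.ofList [c]) = false by simp [ofList_singleton_inj, h]]
      rw [PySem.List.index?_cons_of_ne t h, ih (s + 1)]
      cases hidx : PySem.List.index? t c with
      | none => simp
      | some j =>
        simp [Prod.ext_iff]
        omega

-- The reverse pass builds exactly the first-occurrence-index map.
lemma pos_get? (p : List Char) (c : Char) :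
    (((PySem.List.enumerate p 0).reverse).foldl
        (fun d ic => d.insert (String.ofList [ic.2]) ic.1) PySem.Dict.empty).get? (String.ofList [c])
      = (PySem.List.index? p c).map (fun j => (j : Int)) := by
  rw [get?_revfold, find?_enumerate_eq_index? p c 0]
  cases hidx : PySem.List.index? p c with
  | none => simp
  | some j => simp

-- Inserting a key with the value it already has is a no-op (unique keys, overwrite in place).
lemma dict_insert_eq_self (d : PySem.Dict String String) (k v : String)
    (hnd : d.keys.Nodup) (hv : d.get? k = some v) : d.insert k v = d := by
  have hc : d.contains k = true := by rw [PySem.Dict.contains_eq_isSome_get?, hv]; rfl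
  apply PySem.Dict.ext
  rw [PySem.Dict.items_insert_of_contains (d := d) (k := k) (v := v) hc]
  have h1 : ∀ p ∈ d.items, (if (p.1 == k) = true then (k, v) else p) = p := by
    intro p hp
    by_cases hpk : p.1 = k
    · have hm : (k, p.2) ∈ d.items := by rwa [← hpk]
      have := PySem.Dict.get?_of_mem_items (d := d) hm hnd
      rw [hv] at this
      have h2 : p.2 = v := by injection this.symm
      have : p = (k, v) := by rw [Prod.ext_iff]; exact ⟨hpk, h2⟩
      simp [this]
    · simp [hpk]
  rw [List.map_congr_left h1]; simp

-- A's index loop from position |pre| equals the first-occurrence fold over the remaining suffix,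
-- under the loop invariant: d's keys are exactly the (1-char-string) characters of pre,
-- each bound to cod at its first occurrence in p.
lemma loop_eq (cod p : List Char)
    (hpre : ∀ i, (h : i < p.length) → p[i] ∉ p.take i → i < cod.length) :
    ∀ (suf pre : List Char) (d : PySem.Dict String String),
      p = pre ++ suf →
      d.keys.Nodup →
      (∀ ch : Char, d.contains (String.ofList [ch]) = decide (ch ∈ pre)) →
      (∀ ch : Char, ch ∈ pre → ∃ j, PySem.List.index? p ch = some j ∧
          ∃ ch2, PySem.List.pyGet? cod (j : Int) = some ch2 ∧
            d.get? (String.ofList [ch]) = some (String.ofList [ch2])) →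
      abbinaLoopA cod p pre.length d =
        suf.foldl (fun d c =>
          match PySem.List.index? p c with
          | some j =>
            match PySem.List.pyGet? cod (j : Int) with
            | some ch => d.insert (String.ofList [c]) (String.ofList [ch])
            | none => d
          | none => d) d := by
  intro suf
  induction suf with
  | nil =>
    intro pre d hp _ _ _
    rw [abbinaLoopA]
    have : ¬ pre.length < p.length := by simp [hp]
    simp [this]
  | cons ch suf' ih =>
    intro pre d hp hnd hcont hval
    have hlen : pre.length < p.length := by simp [hp]
    have hgp : p[pre.length]'hlen = ch := by
      subst hp; simp
    have htake : p.take pre.length = pre := by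
      subst hp; exact List.take_left
    rw [abbinaLoopA]
    rw [dif_pos hlen]
    rw [hgp, hcont ch]
    by_cases hmem : ch ∈ pre
    · -- duplicate: A skips; B re-inserts the existing binding (a no-op)
      obtain ⟨j, hidx, ch2, hget, hgot⟩ := hval ch hmem
      have hBstep : (fun d c =>
          match PySem.List.index? p c with
          | some j =>
            match PySem.List.pyGet? cod (j : Int) with
            | some ch => d.insert (String.ofList [c]) (String.ofList [ch])
            | none => d
          | none => d) d ch = d := by
        simp only [hidx, hget]
        exact dict_insert_eq_self d _ _ hnd hgot
      simp only [hmem, decide_true, if_true, List.foldl_cons, hBstep]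
      have hp' : p = (pre ++ [ch]) ++ suf' := by simpa using hp
      have := ih (pre ++ [ch]) d hp' hnd
        (by intro c
            rw [hcont c]
            by_cases hc : c = ch
            · subst hc; simp [hmem]
            · simp [List.mem_append, hc])
        (by intro c hcm
            rcases List.mem_append.mp hcm with hc | hc
            · exact hval c hc
            · simp at hc; rw [hc]; exact hval ch hmem)
      simpa using this
    · -- first occurrence: both sides insert (ch, cod[i]) with i = |pre|
      have hnotin : p[pre.length]'hlen ∉ p.take pre.length := by rw [hgp, htake]; exact hmem
      have hlt : pre.length < cod.length := hpre pre.length hlen hnotin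
      have hget : PySem.List.pyGet? cod (pre.length : Int) = some (cod[pre.length]'hlt) := by
        rw [PySem.List.pyGet?_natCast]
        exact List.getElem?_eq_getElem hlt
      have hidx : PySem.List.index? p ch = some pre.length := by
        rw [PySem.List.index?_eq_some_iff]
        exact ⟨pre, suf', hp, rfl, hmem⟩
      simp only [hmem, decide_false, List.foldl_cons, hidx, hget]
      have hp' : p = (pre ++ [ch]) ++ suf' := by simpa using hp
      set d' := d.insert (String.ofList [ch]) (String.ofList [cod[pre.length]'hlt]) with hd'
      have := ih (pre ++ [ch]) d' hp'
        (PySem.Dict.nodup_keys_insert _ _ _ hnd)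
        (by intro c
            rw [hd', PySem.Dict.contains_insert, hcont c]
            by_cases hc : c = ch
            · subst hc; simp
            · have : (String.ofList [c] == String.ofList [ch]) = false := by
                simp only [beq_eq_false_iff_ne, ne_eq, ofList_singleton_inj]; exact hc
              simp [this, List.mem_append, hc])
        (by intro c hcm
            rcases List.mem_append.mp hcm with hc | hc
            · obtain ⟨j, hj1, c2, hj2, hj3⟩ := hval c hc
              refine ⟨j, hj1, c2, hj2, ?_⟩
              rw [hd', PySem.Dict.get?_insert_of_ne]
              · exact hj3
              · rw [ne_eq, ofList_singleton_inj]; intro he; subst he; exact hmem hc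
            · simp at hc; subst hc
              exact ⟨pre.length, hidx, _, hget, by rw [hd', PySem.Dict.get?_insert_self]⟩)
      simpa using this

-- B's second pass, which looks indices up in pos, equals the index?-based fold on p's own elements.
lemma alt_fold_congr (cod p : List Char) (d0 : PySem.Dict String String) :
    p.foldl (fun d c =>
        match (((PySem.List.enumerate p 0).reverse).foldl
            (fun d ic => d.insert (String.ofList [ic.2]) ic.1) PySem.Dict.empty).get? (String.ofList [c]) with
        | some j =>
          match PySem.List.pyGet? cod j with
          | some ch => d.insert (String.ofList [c]) (String.ofList [ch])
          | none => d
        | none => d) d0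
      = p.foldl (fun d c =>
        match PySem.List.index? p c with
        | some j =>
          match PySem.List.pyGet? cod (j : Int) with
          | some ch => d.insert (String.ofList [c]) (String.ofList [ch])
          | none => d
        | none => d) d0 := by
  apply PySem.List.foldl_congr_mem
  intro acc c hc
  rw [pos_get? p c]
  cases hidx : PySem.List.index? p c with
  | none => rfl
  | some j => rfl

-- ===== VERDICT (by name: the statement is the Claim_ definition above) =====
theorem abbina_spec : Claim_equal_abbina := by
  intro cod parola _ hpre
  have h := loop_eq cod.toList parola.toList hpre parola.toList [] PySem.Dict.empty
    (by simp) (by simp) (by simp [PySem.Dict.contains_empty]) (by simp)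
  have h2 := alt_fold_congr cod.toList parola.toList PySem.Dict.empty
  unfold Spec_abbina abbina abbina_alt
  exact congrArg PySem.Dict.items (h.trans h2.symm)
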